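-- pv_equiv track=rewrite | github.com/Dhruv-Sharma01/Approximate_Multipliers_LUTs | approximate_multipliers_lut.py | loa_multiplier
-- ===== SOURCE A (Python) =====
-- def loa_multiplier(a, b):
--     res = 0
--     for i in range(8):
--         if (a >> i) & 1:
--             for j in range(8):
--                 if (b >> j) & 1:
--                     res |= (1 << (i + j))
--     return res
-- ===== SOURCE B (Python) =====
-- def loa_multiplier(a, b):
--     # Same result, but the inner loop over b's bits is replaced by one
--     # bit-parallel OR of b's low byte shifted into position.
--     res = 0
--     m = b & 0xFF
--     for i in range(8):
--         if (a >> i) & 1: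
--             res |= m << i
--     return res
-- ===== Notes on version B (the rewrite author's own statement) =====
-- stated objective: simpler
-- what changed: The inner loop over b's bits is removed: for each set bit i of a's low byte, B ORs in (b & 0xFF) << i in one step, since OR-ing 1<<(i+j) over the set bits j of b's low byte equals that single shifted mask.
import Mathlib
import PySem

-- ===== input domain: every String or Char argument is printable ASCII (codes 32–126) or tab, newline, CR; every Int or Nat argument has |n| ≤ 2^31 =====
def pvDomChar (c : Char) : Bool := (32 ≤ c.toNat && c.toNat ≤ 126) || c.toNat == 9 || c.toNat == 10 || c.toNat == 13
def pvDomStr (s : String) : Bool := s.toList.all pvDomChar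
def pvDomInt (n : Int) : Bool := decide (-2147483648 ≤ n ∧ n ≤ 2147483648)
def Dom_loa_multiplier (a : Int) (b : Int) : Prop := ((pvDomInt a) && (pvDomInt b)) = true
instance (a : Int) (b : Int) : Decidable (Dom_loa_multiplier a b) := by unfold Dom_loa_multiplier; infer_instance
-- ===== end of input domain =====

-- B replaces the inner loop over b's bits by a single OR of (b & 0xFF) << i; proved equal to A for all integers.

-- ===== PORT A =====
def loa_multiplier (a : Int) (b : Int) : Int :=
  (List.range 8).foldl (fun (res : Int) (i : Nat) =>
    if PySem.Int.band (a >>> i) 1 ≠ 0 then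
      (List.range 8).foldl (fun (r : Int) (j : Nat) =>
        if PySem.Int.band (b >>> j) 1 ≠ 0 then PySem.Int.bor r ((1 : Int) <<< (i + j)) else r) res
    else res) 0

-- ===== PORT B =====
def loa_multiplier_alt (a : Int) (b : Int) : Int :=
  let m := PySem.Int.band b 255
  (List.range 8).foldl (fun (res : Int) (i : Nat) =>
    if PySem.Int.band (a >>> i) 1 ≠ 0 then PySem.Int.bor res (m <<< i) else res) 0

-- ===== PRECONDITION & SPEC =====
def Spec_loa_multiplier (a : Int) (b : Int) (out : Int) : Prop := out = loa_multiplier_alt a b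
instance (a : Int) (b : Int) (out : Int) : Decidable (Spec_loa_multiplier a b out) := by unfold Spec_loa_multiplier; infer_instance

-- ===== CLAIM (what is proved, stated in full; the proofs are below) =====
def Claim_equal_loa_multiplier : Prop := ∀ (a : Int) (b : Int), Dom_loa_multiplier a b → Spec_loa_multiplier a b (loa_multiplier a b)

-- ===== LEMMAS AND PROOFS =====

-- A's inner-loop body, named for the proofs
def pvInner (b : Int) (i : Nat) (r : Int) (j : Nat) : Int :=
  if PySem.Int.band (b >>> j) 1 ≠ 0 then PySem.Int.bor r ((1 : Int) <<< (i + j)) else r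

theorem pv_shl_nonneg (x : Int) (k : Nat) (hx : 0 ≤ x) : 0 ≤ x <<< k := by
  rw [Int.shiftLeft_eq]; positivity

theorem pv_bor_nonneg {a b : Int} (ha : 0 ≤ a) (hb : 0 ≤ b) : 0 ≤ PySem.Int.bor a b := by
  rw [PySem.Int.bor_of_nonneg ha hb]; exact Int.natCast_nonneg _

theorem pv_bor_zero_left (a : Int) : PySem.Int.bor 0 a = a := by
  rw [PySem.Int.bor_comm]; exact PySem.Int.bor_zero a

theorem pv_bor_assoc {a b c : Int} (ha : 0 ≤ a) (hb : 0 ≤ b) (hc : 0 ≤ c) :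
    PySem.Int.bor (PySem.Int.bor a b) c = PySem.Int.bor a (PySem.Int.bor b c) := by
  lift a to ℕ using ha
  lift b to ℕ using hb
  lift c to ℕ using hc
  simp [Nat.lor_assoc]

theorem pv_inner_nonneg (b : Int) (i : Nat) :
    ∀ (l : List Nat) (res : Int), 0 ≤ res → 0 ≤ l.foldl (pvInner b i) res := by
  intro l
  induction l with
  | nil => intro res h; simpa using h
  | cons j t ih =>
    intro res h
    simp only [List.foldl_cons]
    apply ih
    unfold pvInner
    split
    · exact pv_bor_nonneg h (pv_shl_nonneg 1 (i + j) (by norm_num))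
    · exact h

-- hoisting the accumulator out of the inner fold
theorem pv_inner_hoist (b : Int) (i : Nat) :
    ∀ (l : List Nat) (res : Int), 0 ≤ res →
      l.foldl (pvInner b i) res = PySem.Int.bor res (l.foldl (pvInner b i) 0) := by
  intro l
  induction l with
  | nil => intro res _; simp [PySem.Int.bor_zero]
  | cons j t ih =>
    intro res hres
    simp only [List.foldl_cons]
    have h1 : 0 ≤ (1 : Int) <<< (i + j) := pv_shl_nonneg 1 (i + j) (by norm_num)
    by_cases hc : PySem.Int.band (b >>> j) 1 ≠ 0
    · have hstep : 0 ≤ PySem.Int.bor res ((1 : Int) <<< (i + j)) := pv_bor_nonneg hres h1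
      rw [show pvInner b i res j = PySem.Int.bor res ((1 : Int) <<< (i + j)) by simp [pvInner, hc],
          show pvInner b i 0 j = PySem.Int.bor 0 ((1 : Int) <<< (i + j)) by simp [pvInner, hc],
          ih _ hstep, ih _ (pv_bor_nonneg (by norm_num) h1), pv_bor_zero_left,
          pv_bor_assoc hres h1 (pv_inner_nonneg b i t 0 le_rfl)]
    · rw [show pvInner b i res j = res by simp [pvInner, hc],
          show pvInner b i 0 j = 0 by simp [pvInner, hc], ih _ hres]

-- A's condition bit j (j < 8) depends only on b mod 256
theorem pv_cond_reduce (b : Int) (j : Nat) (hj : j < 8) :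
    PySem.Int.band (b >>> j) 1 = PySem.Int.band ((b % 256) >>> j) 1 := by
  rw [PySem.Int.band_one, PySem.Int.band_one]
  unfold PySem.Int.mod
  rw [Int.shiftRight_eq_div_pow, Int.shiftRight_eq_div_pow]
  rw [Int.fmod_eq_emod, Int.fmod_eq_emod]
  interval_cases j <;> simp <;> omega

-- b & 255 is b mod 256
theorem pv_and255 (n : Nat) : n &&& 255 = n % 256 := by
  have := Nat.and_two_pow_sub_one_eq_mod n 8
  norm_num at this
  exact this

theorem pv_band255 (b : Int) : PySem.Int.band b 255 = b % 256 := by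
  by_cases hb : (0 : Int) ≤ b
  · rw [PySem.Int.band_of_nonneg hb (by norm_num)]
    rw [show ((255 : Int).toNat) = 255 from rfl]
    rw [pv_and255 b.toNat]
    omega
  · unfold PySem.Int.band
    rw [if_neg hb, if_pos (by norm_num)]
    rw [show ((255 : Int).toNat) = 255 from rfl]
    rw [Nat.and_comm, pv_and255 (-b - 1).toNat]
    omega

-- the inner fold from 0, for reduced b and i < 8, computed by the kernel
set_option maxRecDepth 8000 in
set_option maxHeartbeats 1600000 in
theorem pv_base_table :
    ∀ r ∈ List.range 256, ∀ i ∈ List.range 8,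
      (List.range 8).foldl (pvInner (r : Int) i) 0 = PySem.Int.band (r : Int) 255 <<< i := by
  decide

-- the inner fold equals one OR of the shifted low byte of b
theorem pv_inner_eq (b : Int) (i : Nat) (hi : i < 8) (res : Int) (hres : 0 ≤ res) :
    (List.range 8).foldl (pvInner b i) res = PySem.Int.bor res (PySem.Int.band b 255 <<< i) := by
  rw [pv_inner_hoist b i _ res hres]
  congr 1
  have hred : (List.range 8).foldl (pvInner b i) 0
      = (List.range 8).foldl (pvInner (b % 256) i) 0 := by
    apply PySem.List.foldl_congr_mem
    intro acc j hj
    unfold pvInner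
    rw [pv_cond_reduce b j (List.mem_range.mp hj)]
  have hb : 0 ≤ b % 256 := Int.emod_nonneg b (by norm_num)
  have hb' : b % 256 < 256 := Int.emod_lt_of_pos b (by norm_num)
  have hcast : b % 256 = (((b % 256).toNat : Nat) : Int) := by omega
  have hmem : (b % 256).toNat ∈ List.range 256 := List.mem_range.mpr (by omega)
  rw [hred, hcast, pv_base_table _ hmem i (List.mem_range.mpr hi)]
  rw [pv_band255, pv_band255, ← hcast, Int.emod_emod_of_dvd _ (by norm_num)]

-- the outer folds of A and B agree step by step
theorem pv_outer_eq (a b : Int) :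
    ∀ (l : List Nat), (∀ i ∈ l, i < 8) → ∀ (res : Int), 0 ≤ res →
      l.foldl (fun (res : Int) (i : Nat) =>
        if PySem.Int.band (a >>> i) 1 ≠ 0 then
          (List.range 8).foldl (pvInner b i) res
        else res) res
      = l.foldl (fun (res : Int) (i : Nat) =>
        if PySem.Int.band (a >>> i) 1 ≠ 0 then PySem.Int.bor res (PySem.Int.band b 255 <<< i)
        else res) res := by
  intro l
  induction l with
  | nil => intro _ res _; rfl
  | cons i t ih =>
    intro hl res hres
    have hi : i < 8 := hl i (by simp)
    have hmask : 0 ≤ PySem.Int.band b 255 <<< i :=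
      pv_shl_nonneg _ i (by rw [PySem.Int.band_comm]; exact PySem.Int.band_nonneg_of_nonneg_left b (by norm_num))
    simp only [List.foldl_cons]
    by_cases hc : PySem.Int.band (a >>> i) 1 ≠ 0
    · rw [if_pos hc, if_pos hc, pv_inner_eq b i hi res hres]
      exact ih (fun x hx => hl x (List.mem_cons_of_mem _ hx)) _ (pv_bor_nonneg hres hmask)
    · rw [if_neg hc, if_neg hc]
      exact ih (fun x hx => hl x (List.mem_cons_of_mem _ hx)) _ hres

-- ===== VERDICT (by name: the statement is the Claim_ definition above) =====
theorem loa_multiplier_spec : Claim_equal_loa_multiplier := by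
  intro a b _
  show loa_multiplier a b = loa_multiplier_alt a b
  unfold loa_multiplier loa_multiplier_alt
  exact pv_outer_eq a b (List.range 8) (fun i hi => List.mem_range.mp hi) 0 le_rfl
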